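-- pv_equiv track=rewrite | github.com/raghav-ambitus/env-sample | backend/main.py | shapes_match
-- ===== SOURCE A (Python) =====
-- def normalize_shape(cells):
--     """Normalize a shape to its canonical form"""
--     if not cells:
--         return []
--     xs = [x for x, y in cells]
--     ys = [y for x, y in cells]
--     min_x, min_y = min(xs), min(ys)
--     normalized = sorted([(x - min_x, y - min_y) for x, y in cells])
--     return normalized
--
-- def shapes_match(cells1, cells2):
--     """Check if two shapes match (considering rotations and reflections)"""
--     if len(cells1) != len(cells2):
--         return False
--
--     norm1 = normalize_shape(cells1)
--
--     # Try all rotations and reflections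
--     for flip_x in [False, True]:
--         for flip_y in [False, True]:
--             for rot in range(4):
--                 transformed = []
--                 for x, y in cells2:
--                     nx, ny = x, y
--                     if flip_x:
--                         nx = -nx
--                     if flip_y:
--                         ny = -ny
--                     # Rotate
--                     for _ in range(rot):
--                         nx, ny = -ny, nx
--                     transformed.append((nx, ny))
--
--                 if normalize_shape(transformed) == norm1:
--                     return True
--     return False
-- ===== SOURCE B (Python) =====
-- def normalize_shape(cells):
--     """Normalize a shape to its canonical form"""
--     if not cells:
--         return []
--     xs = [x for x, y in cells]
--     ys = [y for x, y in cells]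
--     min_x, min_y = min(xs), min(ys)
--     normalized = sorted([(x - min_x, y - min_y) for x, y in cells])
--     return normalized
--
-- def _canonical(cells):
--     """Lexicographically smallest normalized form over the 8 dihedral transforms."""
--     forms = []
--     for flip in (False, True):
--         for rot in range(4):
--             cur = []
--             for x, y in cells:
--                 nx = -x if flip else x
--                 ny = y
--                 for _ in range(rot):
--                     nx, ny = -ny, nx
--                 cur.append((nx, ny))
--             forms.append(normalize_shape(cur))
--     return min(forms)
--
-- def shapes_match(cells1, cells2):
--     return _canonical(cells1) == _canonical(cells2)
-- ===== Notes on version B (the rewrite author's own statement) =====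
-- stated objective: alternative
-- what changed: Instead of testing all 16 flip/rotation transforms of cells2 against the fixed normalization of cells1 with an early exit, B computes for each shape a canonical orbit representative (the lexicographic minimum of the 8 normalized dihedral transforms) and compares the two canonical forms; the redundant length check disappears.
import Mathlib
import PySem

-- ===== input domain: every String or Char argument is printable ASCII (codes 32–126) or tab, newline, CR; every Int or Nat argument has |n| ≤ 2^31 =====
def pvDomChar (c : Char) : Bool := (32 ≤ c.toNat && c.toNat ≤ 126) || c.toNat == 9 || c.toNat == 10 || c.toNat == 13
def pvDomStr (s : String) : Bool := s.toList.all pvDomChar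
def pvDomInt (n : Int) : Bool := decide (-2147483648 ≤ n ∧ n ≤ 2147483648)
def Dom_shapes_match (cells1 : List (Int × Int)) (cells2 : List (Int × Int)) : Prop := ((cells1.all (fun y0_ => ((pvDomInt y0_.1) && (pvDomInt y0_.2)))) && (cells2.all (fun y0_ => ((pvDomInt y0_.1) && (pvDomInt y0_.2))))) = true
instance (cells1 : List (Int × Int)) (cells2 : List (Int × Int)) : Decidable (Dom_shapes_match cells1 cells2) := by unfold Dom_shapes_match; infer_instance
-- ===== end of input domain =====

-- B replaces A's early-exit scan of 16 flip/rotation transforms of cells2 against cells1's fixed normalization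
-- by comparing canonical orbit representatives (lexicographic minimum over each shape's 8 normalized dihedral transforms).

-- ===== PORT A =====
-- shared module helper normalize_shape (used verbatim by both Pythons);
-- sorted(list of int pairs) is Python's lexicographic tuple sort = PySem.List.sorted2 with fst/snd keys;
-- min(xs)/min(ys) run on nonempty (guarded) int lists, so the .getD 0 default is never taken.
def normalize_shape (cells : List (Int × Int)) : List (Int × Int) :=
  if cells = [] then []
  else
    let xs := cells.map (fun p => p.1)
    let ys := cells.map (fun p => p.2)
    let min_x := (PySem.List.min? xs (fun v => v)).getD 0
    let min_y := (PySem.List.min? ys (fun v => v)).getD 0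
    PySem.List.sorted2 (cells.map (fun p => (p.1 - min_x, p.2 - min_y))) (fun p => p.1) (fun p => p.2)

def shapes_match (cells1 : List (Int × Int)) (cells2 : List (Int × Int)) : Bool :=
  if cells1.length ≠ cells2.length then false
  else
    let norm1 := normalize_shape cells1
    [false, true].any (fun flip_x =>
      [false, true].any (fun flip_y =>
        (List.range 4).any (fun rot =>
          let transformed := cells2.map (fun p =>
            let nx := if flip_x then -p.1 else p.1
            let ny := if flip_y then -p.2 else p.2
            (List.range rot).foldl (fun q _ => (-q.2, q.1)) (nx, ny))
          normalize_shape transformed == norm1)))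

-- ===== PORT B =====
-- min(forms): Python compares lists of int pairs lexicographically; the injective toLex key
-- realizes exactly that order in Lean; forms always has 8 entries, so the .getD [] default is never taken.
def canonical_shape (cells : List (Int × Int)) : List (Int × Int) :=
  let forms := [false, true].flatMap (fun flip =>
    (List.range 4).map (fun rot =>
      normalize_shape (cells.map (fun p =>
        (List.range rot).foldl (fun q _ => (-q.2, q.1)) (if flip then -p.1 else p.1, p.2)))))
  (PySem.List.min? forms (fun f => f.map (fun p => toLex p))).getD []

def shapes_match_alt (cells1 : List (Int × Int)) (cells2 : List (Int × Int)) : Bool :=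
  canonical_shape cells1 == canonical_shape cells2

-- ===== PRECONDITION & SPEC =====
def Spec_shapes_match (cells1 : List (Int × Int)) (cells2 : List (Int × Int)) (out : Bool) : Prop := out = shapes_match_alt cells1 cells2
instance (cells1 : List (Int × Int)) (cells2 : List (Int × Int)) (out : Bool) : Decidable (Spec_shapes_match cells1 cells2 out) := by unfold Spec_shapes_match; infer_instance

-- ===== CLAIM (what is proved, stated in full; the proofs are below) =====
def Claim_equal_shapes_match : Prop := ∀ (cells1 : List (Int × Int)) (cells2 : List (Int × Int)), Dom_shapes_match cells1 cells2 → Spec_shapes_match cells1 cells2 (shapes_match cells1 cells2)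

-- ===== LEMMAS AND PROOFS =====

-- 2×2 integer matrices: the dihedral transforms both ports iterate, made composable.
structure M2 where
  a : Int
  b : Int
  c : Int
  d : Int
deriving DecidableEq, Repr

def appM (m : M2) (p : Int × Int) : Int × Int := (m.a * p.1 + m.b * p.2, m.c * p.1 + m.d * p.2)
def mulM (m n : M2) : M2 := ⟨m.a*n.a + m.b*n.c, m.a*n.b + m.b*n.d, m.c*n.a + m.d*n.c, m.c*n.b + m.d*n.d⟩
def rotM (m : M2) : M2 := ⟨-m.c, -m.d, m.a, m.b⟩
def baseM (fx fy : Bool) : M2 := ⟨if fx then -1 else 1, 0, 0, if fy then -1 else 1⟩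
def matOf (fx fy : Bool) (r : Nat) : M2 := rotM^[r] (baseM fx fy)
def idM : M2 := ⟨1, 0, 0, 1⟩
def mats16 : List M2 := [false, true].flatMap (fun fx => [false, true].flatMap (fun fy => (List.range 4).map (matOf fx fy)))
def mats8 : List M2 := [false, true].flatMap (fun fx => (List.range 4).map (matOf fx false))
def Orb (c : List (Int × Int)) (m : M2) : List (Int × Int) := normalize_shape (c.map (appM m))
def keyL (f : List (Int × Int)) : List (Int ×ₗ Int) := f.map (fun p => toLex p)
def mnx (c : List (Int × Int)) : Int := (PySem.List.min? (c.map (fun p => p.1)) (fun v => v)).getD 0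
def mny (c : List (Int × Int)) : Int := (PySem.List.min? (c.map (fun p => p.2)) (fun v => v)).getD 0

theorem keyL_injective : Function.Injective keyL :=
  List.map_injective_iff.mpr toLex.injective

theorem appM_mulM (m n : M2) (p : Int × Int) : appM (mulM m n) p = appM m (appM n p) := by
  simp only [appM, mulM]; exact Prod.ext (by ring) (by ring)

theorem rot_fold (r : Nat) (m : M2) (p : Int × Int) :
    (List.range r).foldl (fun q _ => (-q.2, q.1)) (appM m p) = appM (rotM^[r] m) p := by
  induction r with
  | zero => rfl
  | succ n ih =>
    rw [List.range_succ, List.foldl_append, ih, Function.iterate_succ_apply']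
    simp only [List.foldl_cons, List.foldl_nil, appM, rotM]
    exact Prod.ext (by ring) (by ring)

theorem base_app (fx fy : Bool) (p : Int × Int) :
    ((if fx then -p.1 else p.1), (if fy then -p.2 else p.2)) = appM (baseM fx fy) p := by
  cases fx <;> cases fy <;> exact Prod.ext (by simp [appM, baseM]) (by simp [appM, baseM])

theorem transform_eq (fx fy : Bool) (r : Nat) (p : Int × Int) :
    (List.range r).foldl (fun q _ => (-q.2, q.1)) ((if fx then -p.1 else p.1), (if fy then -p.2 else p.2))
      = appM (matOf fx fy r) p := by
  rw [base_app, rot_fold, matOf]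

theorem sorted2_eq_sortedLex (l : List (Int × Int)) :
    PySem.List.sorted2 l (fun p => p.1) (fun p => p.2) = PySem.List.sorted l (fun p => toLex p) := by
  simp only [PySem.List.sorted2, PySem.List.sorted, if_neg (by decide : ¬ (false = true))]
  congr 1
  funext acc x
  congr 1
  funext a b
  simp only [Prod.Lex.lt_iff, ofLex_toLex]
  by_cases h : a.1 < b.1 <;> by_cases h' : b.1 < a.1 <;> by_cases h2 : a.2 < b.2 <;>
    simp [h, h', h2, show (a.1 = b.1) ↔ (¬ a.1 < b.1 ∧ ¬ b.1 < a.1) by omega]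

theorem decLT_irrel {α κ : Type} [LT κ] (d1 d2 : DecidableLT κ) (xs : List α) (key : α → κ) :
    @PySem.List.min? α κ _ d1 xs key = @PySem.List.min? α κ _ d2 xs key := by
  have h : d1 = d2 := by funext a b; exact Subsingleton.elim _ _
  rw [h]

-- the port's `min?` elaborates with core's List order instances; this moves it to the
-- (propositionally equal) LinearOrder instances the order lemmas are stated with
theorem minL_bridge (xs : List (List (Int × Int))) (key : List (Int × Int) → List (Int ×ₗ Int)) :
    PySem.List.min? xs key
      = @PySem.List.min? _ _ List.instLinearOrder.toLT LinearOrder.toDecidableLT xs key :=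
  decLT_irrel _ _ xs key

theorem min?_eq_some_iff_inj {α κ : Type} [LinearOrder κ] {xs : List α} {key : α → κ}
    (hinj : Function.Injective key) {m : α} :
    PySem.List.min? xs key = some m ↔ m ∈ xs ∧ ∀ y ∈ xs, key m ≤ key y := by
  constructor
  · intro h; exact ⟨PySem.List.min?_mem h, PySem.List.min?_isMin h⟩
  · rintro ⟨hm, hmin⟩
    cases hq : PySem.List.min? xs key with
    | none => rw [PySem.List.min?_eq_none_iff] at hq; subst hq; cases hm
    | some m' =>
      have h1 := PySem.List.min?_isMin hq _ hm
      have h2 := hmin _ (PySem.List.min?_mem hq)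
      have : m = m' := hinj (le_antisymm h2 h1)
      rw [this]

theorem min?_perm {α κ : Type} [LinearOrder κ] {xs ys : List α} {key : α → κ}
    (hinj : Function.Injective key) (h : xs.Perm ys) :
    PySem.List.min? xs key = PySem.List.min? ys key := by
  cases hq : PySem.List.min? xs key with
  | none =>
    rw [PySem.List.min?_eq_none_iff] at hq; subst hq
    rw [List.Perm.eq_nil h.symm]; rfl
  | some m =>
    rw [min?_eq_some_iff_inj hinj] at hq
    symm
    rw [min?_eq_some_iff_inj hinj]
    exact ⟨h.mem_iff.mp hq.1, fun y hy => hq.2 y (h.mem_iff.mpr hy)⟩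

theorem normShape_eq {c : List (Int × Int)} (hc : c ≠ []) :
    normalize_shape c = PySem.List.sorted (c.map (fun p => (p.1 - mnx c, p.2 - mny c))) (fun p => toLex p) := by
  simp only [normalize_shape, if_neg hc, sorted2_eq_sortedLex, mnx, mny]

theorem normalize_perm {c c' : List (Int × Int)} (h : c.Perm c') :
    normalize_shape c = normalize_shape c' := by
  by_cases hc : c = []
  · subst hc; rw [List.Perm.eq_nil h.symm]
  · have hc' : c' ≠ [] := fun he => hc (List.Perm.eq_nil (he ▸ h))
    have hmx : mnx c = mnx c' := by
      unfold mnx; rw [min?_perm (fun a b hab => hab) (h.map _)]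
    have hmy : mny c = mny c' := by
      unfold mny; rw [min?_perm (fun a b hab => hab) (h.map _)]
    rw [normShape_eq hc, normShape_eq hc', hmx, hmy]
    exact PySem.List.sorted_eq_sorted_of_perm _ _ _ toLex.injective (h.map _)

theorem mnx_translate (c : List (Int × Int)) (hc : c ≠ []) (t1 t2 : Int) :
    mnx (c.map (fun p => (p.1 + t1, p.2 + t2))) = mnx c + t1 := by
  cases hq : PySem.List.min? (c.map (fun p => p.1)) (fun v => v) with
  | none => rw [PySem.List.min?_eq_none_iff] at hq; simp at hq; exact absurd hq hc
  | some m =>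
    rw [min?_eq_some_iff_inj (fun a b hab => hab)] at hq
    have h2 : PySem.List.min? ((c.map (fun p => (p.1 + t1, p.2 + t2))).map (fun p => p.1)) (fun v => v) = some (m + t1) := by
      rw [min?_eq_some_iff_inj (fun a b hab => hab)]
      simp only [List.map_map, Function.comp_def, List.mem_map]
      obtain ⟨p, hp, hpe⟩ := List.mem_map.mp hq.1
      refine ⟨⟨p, hp, by omega⟩, ?_⟩
      rintro y ⟨q, hq2, rfl⟩
      have := hq.2 q.1 (List.mem_map.mpr ⟨q, hq2, rfl⟩)
      omega
    unfold mnx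
    rw [h2]
    simp only [Option.getD_some]
    have h3 : PySem.List.min? (c.map fun p => p.1) (fun v => v) = some m := by
      rw [min?_eq_some_iff_inj (fun a b hab => hab)]; exact hq
    rw [h3]; rfl

theorem mny_translate (c : List (Int × Int)) (hc : c ≠ []) (t1 t2 : Int) :
    mny (c.map (fun p => (p.1 + t1, p.2 + t2))) = mny c + t2 := by
  cases hq : PySem.List.min? (c.map (fun p => p.2)) (fun v => v) with
  | none => rw [PySem.List.min?_eq_none_iff] at hq; simp at hq; exact absurd hq hc
  | some m =>
    rw [min?_eq_some_iff_inj (fun a b hab => hab)] at hq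
    have h2 : PySem.List.min? ((c.map (fun p => (p.1 + t1, p.2 + t2))).map (fun p => p.2)) (fun v => v) = some (m + t2) := by
      rw [min?_eq_some_iff_inj (fun a b hab => hab)]
      simp only [List.map_map, Function.comp_def, List.mem_map]
      obtain ⟨p, hp, hpe⟩ := List.mem_map.mp hq.1
      refine ⟨⟨p, hp, by omega⟩, ?_⟩
      rintro y ⟨q, hq2, rfl⟩
      have := hq.2 q.2 (List.mem_map.mpr ⟨q, hq2, rfl⟩)
      omega
    unfold mny
    rw [h2]
    simp only [Option.getD_some]
    have h3 : PySem.List.min? (c.map fun p => p.2) (fun v => v) = some m := by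
      rw [min?_eq_some_iff_inj (fun a b hab => hab)]; exact hq
    rw [h3]; rfl

theorem normalize_translate (c : List (Int × Int)) (t1 t2 : Int) :
    normalize_shape (c.map (fun p => (p.1 + t1, p.2 + t2))) = normalize_shape c := by
  by_cases hc : c = []
  · subst hc; rfl
  · have hc2 : c.map (fun p => (p.1 + t1, p.2 + t2)) ≠ [] := by simpa using hc
    rw [normShape_eq hc2, normShape_eq hc, mnx_translate c hc t1 t2, mny_translate c hc t1 t2]
    congr 1
    rw [List.map_map]
    apply List.map_congr_left
    intro p _
    simp only [Function.comp_apply]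
    exact Prod.ext (by omega) (by omega)

theorem length_normalize (c : List (Int × Int)) : (normalize_shape c).length = c.length := by
  by_cases hc : c = []
  · subst hc; rfl
  · rw [normShape_eq hc, (PySem.List.sorted_perm _ _ _).length_eq, List.length_map]

theorem normalize_map_normalize (c : List (Int × Int)) (m : M2) :
    normalize_shape ((normalize_shape c).map (appM m)) = normalize_shape (c.map (appM m)) := by
  by_cases hc : c = []
  · subst hc; rfl
  · have h1 : (normalize_shape c).Perm (c.map (fun p => (p.1 - mnx c, p.2 - mny c))) := by
      rw [normShape_eq hc]; exact PySem.List.sorted_perm _ _ _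
    rw [normalize_perm (h1.map (appM m))]
    have h2 : (c.map (fun p => (p.1 - mnx c, p.2 - mny c))).map (appM m)
        = (c.map (appM m)).map (fun q => (q.1 + -(m.a * mnx c + m.b * mny c), q.2 + -(m.c * mnx c + m.d * mny c))) := by
      simp only [List.map_map]
      apply List.map_congr_left
      intro p _
      simp only [Function.comp_apply, appM]
      exact Prod.ext (by ring) (by ring)
    rw [h2, normalize_translate]

theorem map_appM_id (c : List (Int × Int)) : c.map (appM idM) = c := by
  have h : appM idM = id := by funext p; simp [appM, idM]
  rw [h, List.map_id]

theorem mapT_eq (c : List (Int × Int)) (fx fy : Bool) (r : Nat) :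
    (c.map (fun p => (List.range r).foldl (fun q _ => (-q.2, q.1))
      ((if fx then -p.1 else p.1), (if fy then -p.2 else p.2)))) = c.map (appM (matOf fx fy r)) :=
  List.map_congr_left fun p _ => transform_eq fx fy r p

theorem A_iff (c1 c2 : List (Int × Int)) :
    shapes_match c1 c2 = true ↔ c1.length = c2.length ∧ ∃ m ∈ mats16, Orb c2 m = normalize_shape c1 := by
  by_cases hlen : c1.length = c2.length
  · unfold shapes_match
    rw [if_neg (by omega : ¬ c1.length ≠ c2.length)]
    simp only [List.any_eq_true, List.mem_range, beq_iff_eq, hlen, true_and]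
    constructor
    · rintro ⟨fx, hfx, fy, hfy, r, hr, he⟩
      refine ⟨matOf fx fy r, ?_, ?_⟩
      · simp only [mats16, List.mem_flatMap, List.mem_map, List.mem_range]
        exact ⟨fx, hfx, fy, hfy, r, hr, rfl⟩
      · unfold Orb
        rw [← mapT_eq c2 fx fy r]
        exact he
    · rintro ⟨m, hm, he⟩
      simp only [mats16, List.mem_flatMap, List.mem_map, List.mem_range] at hm
      obtain ⟨fx, hfx, fy, hfy, r, hr, rfl⟩ := hm
      refine ⟨fx, hfx, fy, hfy, r, hr, ?_⟩
      unfold Orb at he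
      rw [← mapT_eq c2 fx fy r] at he
      exact he
  · unfold shapes_match
    rw [if_pos (by omega : c1.length ≠ c2.length)]
    simp [hlen]

theorem canonical_eq (c : List (Int × Int)) :
    canonical_shape c = (PySem.List.min? (mats8.map (Orb c)) keyL).getD [] := by
  have hform : ∀ fx : Bool, (List.range 4).map (fun rot =>
        normalize_shape (c.map (fun p =>
          (List.range rot).foldl (fun q _ => (-q.2, q.1)) (if fx then -p.1 else p.1, p.2))))
      = ((List.range 4).map (matOf fx false)).map (Orb c) := by
    intro fx
    rw [List.map_map]
    apply List.map_congr_left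
    intro r _
    show normalize_shape _ = Orb c (matOf fx false r)
    unfold Orb
    exact congrArg normalize_shape (mapT_eq c fx false r)
  unfold canonical_shape
  simp only [List.flatMap_cons, List.flatMap_nil, List.append_nil, mats8, List.map_append, hform]
  rfl

theorem perm_mul_right : ∀ m0 ∈ mats16, (mats8.map (fun g => mulM g m0)).Perm mats8 := by decide
theorem inv_mem : ∀ g ∈ mats8, ∃ g' ∈ mats8, mulM g' g = idM := by decide
theorem mul_mem16 : ∀ a ∈ mats8, ∀ b ∈ mats8, mulM a b ∈ mats16 := by decide
theorem mats8_ne_nil : mats8 ≠ [] := by decide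

theorem Orb_mul (c : List (Int × Int)) (g h : M2) :
    normalize_shape ((Orb c h).map (appM g)) = Orb c (mulM g h) := by
  unfold Orb
  rw [normalize_map_normalize, List.map_map]
  congr 1
  apply List.map_congr_left
  intro p _
  exact (appM_mulM g h p).symm

theorem Orb_shift {c1 c2 : List (Int × Int)} {m0 : M2} (h : Orb c2 m0 = normalize_shape c1) (g : M2) :
    Orb c1 g = Orb c2 (mulM g m0) := by
  unfold Orb
  rw [← normalize_map_normalize, ← h, Orb_mul]
  rfl

theorem canonical_mem (c : List (Int × Int)) :
    ∃ g ∈ mats8, Orb c g = canonical_shape c ∧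
      PySem.List.min? (mats8.map (Orb c)) keyL = some (canonical_shape c) := by
  cases hq : PySem.List.min? (mats8.map (Orb c)) keyL with
  | none =>
    rw [PySem.List.min?_eq_none_iff] at hq
    exact absurd (List.map_eq_nil_iff.mp hq) mats8_ne_nil
  | some f =>
    obtain ⟨g, hg, hgf⟩ := List.mem_map.mp (PySem.List.min?_mem hq)
    have hc : canonical_shape c = f := by rw [canonical_eq, hq]; rfl
    exact ⟨g, hg, by rw [hc]; exact hgf, by rw [hc]⟩

theorem length_canonical (c : List (Int × Int)) : (canonical_shape c).length = c.length := by
  obtain ⟨g, _, hg, _⟩ := canonical_mem c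
  rw [← hg]
  unfold Orb
  rw [length_normalize, List.length_map]

theorem main_iff (c1 c2 : List (Int × Int)) :
    shapes_match c1 c2 = true ↔ canonical_shape c1 = canonical_shape c2 := by
  rw [A_iff]
  constructor
  · rintro ⟨_, m0, hm0, he⟩
    have hmap : mats8.map (Orb c1) = (mats8.map (fun g => mulM g m0)).map (Orb c2) := by
      rw [List.map_map]
      exact List.map_congr_left fun g _ => Orb_shift he g
    have hperm : (mats8.map (Orb c1)).Perm (mats8.map (Orb c2)) := by
      rw [hmap]; exact (perm_mul_right m0 hm0).map (Orb c2)
    rw [canonical_eq, canonical_eq]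
    simp only [minL_bridge]
    rw [min?_perm keyL_injective hperm]
  · intro hc
    obtain ⟨g, hg, hgo, _⟩ := canonical_mem c1
    obtain ⟨h, hh, hho, _⟩ := canonical_mem c2
    obtain ⟨g', hg', hinv⟩ := inv_mem g hg
    have hlen : c1.length = c2.length := by
      rw [← length_canonical c1, ← length_canonical c2, hc]
    refine ⟨hlen, mulM g' h, mul_mem16 g' hg' h hh, ?_⟩
    have : normalize_shape c1 = Orb c1 (mulM g' g) := by
      unfold Orb
      rw [hinv, map_appM_id]
    rw [this, ← Orb_mul, hho, ← hc, ← hgo, Orb_mul]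

-- ===== VERDICT (by name: the statement is the Claim_ definition above) =====
theorem shapes_match_spec : Claim_equal_shapes_match := by
  intro c1 c2 _
  unfold Spec_shapes_match shapes_match_alt
  rw [Bool.eq_iff_iff, main_iff, beq_iff_eq]
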